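-- pv_equiv track=rewrite | github.com/981377660LMT/algorithm-study | 22_专题/枚举/枚举分割点-前后缀分解/Sort String by Flipping-反转最少的字符，使得所有A出现在B前.py | solve
-- ===== SOURCE A (Python) =====
-- def solve(s: str) -> int:
--     rightA = s.count('x')
--     leftB = 0
--
--     res = rightA
--     for char in s:
--         if char == 'x':
--             rightA -= 1
--         else:
--             leftB += 1
--         res = min(res, leftB + rightA)
--
--     return res
-- ===== SOURCE B (Python) =====
-- def solve(s: str) -> int:
--     # two-state forward DP: a = flips if still in the x-region, b = flips after switching
--     a = b = 0
--     for c in s: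
--         a, b = a + (c != 'x'), min(a, b) + (c == 'x')
--     return min(a, b)
-- ===== Notes on version B (the rewrite author's own statement) =====
-- stated objective: alternative
-- what changed: Replaces the precomputed total-x count plus running split-point minimum with a two-state forward DP (a = flips while still in the x-region, b = best flips after switching to the o-region), no precount and no suffix count maintained.
import Mathlib
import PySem

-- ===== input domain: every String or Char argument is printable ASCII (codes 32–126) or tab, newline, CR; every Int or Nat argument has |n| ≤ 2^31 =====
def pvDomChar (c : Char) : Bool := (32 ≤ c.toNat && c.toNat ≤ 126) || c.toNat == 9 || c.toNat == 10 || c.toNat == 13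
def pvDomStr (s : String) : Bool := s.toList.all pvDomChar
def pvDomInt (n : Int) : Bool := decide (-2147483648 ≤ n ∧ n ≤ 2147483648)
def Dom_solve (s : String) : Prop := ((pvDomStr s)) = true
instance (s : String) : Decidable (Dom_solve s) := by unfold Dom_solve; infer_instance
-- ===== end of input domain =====

-- B replaces A's precomputed x-count plus split-point minimum by a two-state forward DP (objective: alternative, same cost).

-- ===== PORT A =====
-- loop body of A: state (rightA, leftB, res)
def solveStep (st : Int × Int × Int) (char : Char) : Int × Int × Int :=
  let (rightA, leftB, res) := st
  if char == 'x' then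
    let rightA := rightA - 1
    (rightA, leftB, min res (leftB + rightA))
  else
    let leftB := leftB + 1
    (rightA, leftB, min res (leftB + rightA))

def solve (s : String) : Int :=
  let rightA : Int := (PySem.Str.count s "x" : Int)
  let leftB : Int := 0
  let res : Int := rightA
  (s.toList.foldl solveStep (rightA, leftB, res)).2.2

-- ===== PORT B =====
-- loop body of B: state (a, b)
def solveAltStep (ab : Int × Int) (c : Char) : Int × Int :=
  (ab.1 + (if c != 'x' then 1 else 0), min ab.1 ab.2 + (if c == 'x' then 1 else 0))

def solve_alt (s : String) : Int :=
  let ab := s.toList.foldl solveAltStep (0, 0)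
  min ab.1 ab.2

-- ===== PRECONDITION & SPEC =====
def Spec_solve (s : String) (out : Int) : Prop := out = solve_alt s
instance (s : String) (out : Int) : Decidable (Spec_solve s out) := by unfold Spec_solve; infer_instance

-- ===== CLAIM (what is proved, stated in full; the proofs are below) =====
def Claim_equal_solve : Prop := ∀ (s : String), Dom_solve s → Spec_solve s (solve s)

-- ===== LEMMAS AND PROOFS =====

-- Python's str.count with a single-character needle is the character count.
lemma countGo_singleton (c : Char) :
    ∀ (fuel : Nat) (l : List Char) (acc : Nat), l.length ≤ fuel →
      PySem.Chars.count.go [c] fuel l acc = acc + l.count c := by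
  intro fuel
  induction fuel with
  | zero =>
    intro l acc h
    have : l = [] := List.length_eq_zero_iff.mp (Nat.le_zero.mp h)
    subst this
    simp [PySem.Chars.count.go]
  | succ n ih =>
    intro l acc h
    cases l with
    | nil => simp [PySem.Chars.count.go]
    | cons hd t =>
      simp only [PySem.Chars.count.go]
      by_cases hc : hd = c
      · subst hc
        have hp : [hd].isPrefixOf (hd :: t) = true := by simp [List.isPrefixOf]
        simp only [hp, List.length_singleton, List.drop_one, List.tail_cons, if_true]
        rw [ih t (acc + 1) (by simpa using Nat.lt_succ_iff.mp (by simpa using h))]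
        simp [List.count_cons]
        omega
      · have hp : [c].isPrefixOf (hd :: t) = false := by
          simp [List.isPrefixOf]
          exact fun hh => (hc hh.symm).elim
        simp only [hp]
        simp only [Bool.false_eq_true, if_false]
        rw [ih t acc (by simpa using Nat.lt_succ_iff.mp (by simpa using h))]
        have : t.count c = List.count c (hd :: t) := by
          simp [List.count_cons]
          intro hh; exact absurd hh hc
        omega

lemma count_singleton (cs : List Char) (c : Char) :
    PySem.Chars.count cs [c] = cs.count c := by
  unfold PySem.Chars.count
  simp only [List.isEmpty_cons, if_false, Bool.false_eq_true]
  simpa using countGo_singleton c cs.length cs 0 le_rfl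

-- Loop invariant: A's fold with res = min a b + (x-count of the rest) tracks B's fold.
lemma loop_eq (l : List Char) : ∀ (a b : Int),
    (l.foldl solveStep (((l.count 'x' : Nat) : Int), a, min a b + ((l.count 'x' : Nat) : Int))).2.2
      = min (l.foldl solveAltStep (a, b)).1 (l.foldl solveAltStep (a, b)).2 := by
  induction l with
  | nil => intro a b; simp
  | cons c t ih =>
    intro a b
    by_cases hc : c = 'x'
    · subst hc
      have hcount : ((List.count 'x' ('x' :: t) : Nat) : Int) = ((t.count 'x' : Nat) : Int) + 1 := by
        simp [List.count_cons]
      simp only [List.foldl_cons, solveStep, solveAltStep, hcount, bne_self_eq_false,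
        Bool.false_eq_true, if_false, beq_self_eq_true, if_true, add_zero]
      have hrw : (((t.count 'x' : Nat) : Int) + 1 - 1, a,
            min (min a b + (((t.count 'x' : Nat) : Int) + 1)) (a + (((t.count 'x' : Nat) : Int) + 1 - 1)))
          = (((t.count 'x' : Nat) : Int), a, min a (min a b + 1) + ((t.count 'x' : Nat) : Int)) := by
        simp only [Prod.mk.injEq, true_and, and_true]
        omega
      rw [hrw]
      exact ih a (min a b + 1)
    · have hcount : ((List.count 'x' (c :: t) : Nat) : Int) = ((t.count 'x' : Nat) : Int) := by
        simp [hc]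
      have hbne : (c != 'x') = true := by simp [bne, hc]
      have hbeq : (c == 'x') = false := by simp [hc]
      simp only [List.foldl_cons, solveStep, solveAltStep, hcount, hbeq, hbne, Bool.false_eq_true,
        if_false, if_true, add_zero]
      have hrw : (((t.count 'x' : Nat) : Int), a + 1,
            min (min a b + ((t.count 'x' : Nat) : Int)) (a + 1 + ((t.count 'x' : Nat) : Int)))
          = (((t.count 'x' : Nat) : Int), a + 1, min (a + 1) (min a b) + ((t.count 'x' : Nat) : Int)) := by
        simp only [Prod.mk.injEq, true_and, and_true]
        omega
      rw [hrw]
      exact ih (a + 1) (min a b)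

-- ===== VERDICT (by name: the statement is the Claim_ definition above) =====
theorem solve_spec : Claim_equal_solve := by
  intro s _
  unfold Spec_solve solve solve_alt
  simp only [PySem.Str.count_eq]
  have hc : PySem.Chars.count s.toList "x".toList = s.toList.count 'x' := by
    simpa using count_singleton s.toList 'x'
  rw [hc]
  have := loop_eq s.toList 0 0
  simpa using this
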